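-- pv_equiv track=rewrite | github.com/nicobartok0/ComputacionII | TP2/processor/image_processor.py | _is_valid_image_url
-- ===== SOURCE A (Python) =====
-- def _is_valid_image_url(url):
--     """
--     Valida si una URL de imagen es válida.
--
--     Args:
--         url: URL a validar
--
--     Returns:
--         Boolean indicando si es válida
--     """
--     try:
--         # Verificar que sea HTTP/HTTPS
--         if not url.startswith(('http://', 'https://')):
--             return False
--
--         # Verificar extensión
--         lower_url = url.lower()
--         image_extensions = ['.jpg', '.jpeg', '.png', '.gif', '.webp', '.bmp']
--         return any(lower_url.endswith(ext) or ext + '?' in lower_url for ext in image_extensions)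
--     except:
--         return False
-- ===== SOURCE B (Python) =====
-- def _is_valid_image_url(url):
--     if not url.startswith(('http://', 'https://')):
--         return False
--     s = url.lower()
--     n = len(s)
--     exts = ('.jpg', '.jpeg', '.png', '.gif', '.webp', '.bmp')
--     # single left-to-right scan: an extension counts if it occurs at some
--     # position and is immediately followed by end-of-string or the query marker
--     for i in range(n):
--         for ext in exts:
--             j = i + len(ext)
--             if s[i:j] == ext and (j == n or s[j] == '?'):
--                 return True
--     return False
-- ===== Notes on version B (the rewrite author's own statement) =====
-- stated objective: alternative
-- what changed: Replaces the six per-extension passes (endswith plus a substring search for the extension followed by the query marker) with one left-to-right scan of the lowered URL that tests, at each position, whether an extension occurs there followed by end-of-string or the query marker.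
import Mathlib
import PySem

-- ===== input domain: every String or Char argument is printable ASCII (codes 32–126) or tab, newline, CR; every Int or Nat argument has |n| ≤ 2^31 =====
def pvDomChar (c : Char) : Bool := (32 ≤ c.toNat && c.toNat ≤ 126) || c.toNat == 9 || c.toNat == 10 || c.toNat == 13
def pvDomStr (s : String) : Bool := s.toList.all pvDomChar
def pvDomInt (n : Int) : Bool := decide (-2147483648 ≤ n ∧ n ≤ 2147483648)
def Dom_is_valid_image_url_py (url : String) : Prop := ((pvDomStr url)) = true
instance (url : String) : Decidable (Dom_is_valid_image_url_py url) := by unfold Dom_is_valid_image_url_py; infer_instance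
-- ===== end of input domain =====

-- B replaces A's six per-extension passes with a single left-to-right scan of the lowered URL (alternative decomposition, same cost).

-- ===== PORT A =====
def pvExts : List (List Char) :=
  [".jpg".toList, ".jpeg".toList, ".png".toList, ".gif".toList, ".webp".toList, ".bmp".toList]

def is_valid_image_url_py (url : String) : Bool :=
  if !(PySem.Chars.startswith url.toList "http://".toList
        || PySem.Chars.startswith url.toList "https://".toList) then
    false
  else
    let lower_url := PySem.Chars.lower url.toList
    pvExts.any (fun ext =>
      PySem.Chars.endswith lower_url ext || PySem.Chars.isIn (ext ++ "?".toList) lower_url)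

-- ===== PORT B =====
def pvExtsB : List (List Char) :=
  [".jpg".toList, ".jpeg".toList, ".png".toList, ".gif".toList, ".webp".toList, ".bmp".toList]

-- inner test of Source B: s[i:j] == ext and (j == n or s[j] == '?'), on the suffix s.drop i
def pvMatchAt (t : List Char) (ext : List Char) : Bool :=
  ext.isPrefixOf t &&
    (match t.drop ext.length with
     | [] => true
     | c :: _ => c == '?')

-- the loop 'for i in range(n)' of Source B, as structural recursion over the suffixes
def pvScan : List Char → Bool
  | [] => false
  | c :: rest => pvExtsB.any (fun ext => pvMatchAt (c :: rest) ext) || pvScan rest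

def is_valid_image_url_py_alt (url : String) : Bool :=
  if !(PySem.Chars.startswith url.toList "http://".toList
        || PySem.Chars.startswith url.toList "https://".toList) then
    false
  else
    pvScan (PySem.Chars.lower url.toList)

-- ===== PRECONDITION & SPEC =====
def Spec_is_valid_image_url_py (url : String) (out : Bool) : Prop := out = is_valid_image_url_py_alt url
instance (url : String) (out : Bool) : Decidable (Spec_is_valid_image_url_py url out) := by unfold Spec_is_valid_image_url_py; infer_instance

-- ===== CLAIM (what is proved, stated in full; the proofs are below) =====
def Claim_equal_is_valid_image_url_py : Prop := ∀ (url : String), Dom_is_valid_image_url_py url → Spec_is_valid_image_url_py url (is_valid_image_url_py url)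

-- ===== LEMMAS AND PROOFS =====

lemma pvScan_iff (s : List Char) :
    pvScan s = true ↔ ∃ t, t <:+ s ∧ ∃ ext ∈ pvExtsB, pvMatchAt t ext = true := by
  induction s with
  | nil =>
    constructor
    · intro h; simp [pvScan] at h
    · rintro ⟨t, ht, ext, hm, hmt⟩
      rw [List.suffix_nil] at ht
      subst ht
      simp only [pvExtsB, List.mem_cons, List.not_mem_nil, or_false] at hm
      rcases hm with rfl | rfl | rfl | rfl | rfl | rfl <;> exact absurd hmt (by decide)
  | cons c rest ih =>
    simp only [pvScan, Bool.or_eq_true, List.any_eq_true, ih]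
    constructor
    · rintro (⟨ext, hm, hmt⟩ | ⟨t, hts, hex⟩)
      · exact ⟨c :: rest, List.suffix_refl _, ext, hm, hmt⟩
      · exact ⟨t, hts.trans (List.suffix_cons c rest), hex⟩
    · rintro ⟨t, hts, ext, hm, hmt⟩
      rcases List.suffix_cons_iff.mp hts with h | h
      · exact Or.inl ⟨ext, hm, h ▸ hmt⟩
      · exact Or.inr ⟨t, h, ext, hm, hmt⟩

lemma pvMatchAt_iff (ext t : List Char) :
    pvMatchAt t ext = true ↔ (t = ext ∨ (ext ++ ['?']) <+: t) := by
  unfold pvMatchAt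
  rw [Bool.and_eq_true, List.isPrefixOf_iff_prefix]
  constructor
  · rintro ⟨⟨r, hr⟩, h2⟩
    subst hr
    rw [List.drop_left] at h2
    cases r with
    | nil => exact Or.inl (by simp)
    | cons c r' =>
      right
      simp only [beq_iff_eq] at h2
      subst h2
      exact ⟨r', by simp⟩
  · rintro (rfl | ⟨r, hr⟩)
    · exact ⟨List.prefix_refl _, by simp⟩
    · subst hr
      refine ⟨⟨'?' :: r, by simp⟩, ?_⟩
      rw [show ext ++ ['?'] ++ r = ext ++ ('?' :: r) by simp, List.drop_left]
      rfl

lemma pvPerExt (ext l : List Char) :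
    (PySem.Chars.endswith l ext || PySem.Chars.isIn (ext ++ "?".toList) l) = true ↔
      ∃ t, t <:+ l ∧ pvMatchAt t ext = true := by
  rw [Bool.or_eq_true, PySem.Chars.isIn_iff_infix, List.infix_iff_prefix_suffix]
  simp only [PySem.Chars.endswith, List.isSuffixOf_iff_suffix]
  constructor
  · rintro (h | h)
    · exact ⟨ext, h, (pvMatchAt_iff ext ext).mpr (Or.inl rfl)⟩
    · rcases h with ⟨t, hpre, hsuf⟩
      exact ⟨t, hsuf, (pvMatchAt_iff ext t).mpr (Or.inr (by simpa using hpre))⟩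
  · rintro ⟨t, hsuf, hm⟩
    rcases (pvMatchAt_iff ext t).mp hm with rfl | hpre
    · exact Or.inl hsuf
    · exact Or.inr ⟨t, by simpa using hpre, hsuf⟩

lemma pvBody (l : List Char) :
    pvExts.any (fun ext =>
      PySem.Chars.endswith l ext || PySem.Chars.isIn (ext ++ "?".toList) l) = pvScan l := by
  rw [Bool.eq_iff_iff, List.any_eq_true, pvScan_iff, show pvExtsB = pvExts from rfl]
  constructor
  · rintro ⟨ext, hm, h⟩
    rcases (pvPerExt ext l).mp h with ⟨t, hts, hmt⟩
    exact ⟨t, hts, ext, hm, hmt⟩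
  · rintro ⟨t, hts, ext, hm, hmt⟩
    exact ⟨ext, hm, (pvPerExt ext l).mpr ⟨t, hts, hmt⟩⟩

-- ===== VERDICT (by name: the statement is the Claim_ definition above) =====
theorem is_valid_image_url_py_spec : Claim_equal_is_valid_image_url_py := by
  intro url _
  unfold Spec_is_valid_image_url_py is_valid_image_url_py is_valid_image_url_py_alt
  split
  · rfl
  · exact pvBody _
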